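-- pv_equiv track=rewrite | github.com/pawanct08/dbcdiff | dbcdiff/reporters/html_reporter.py | _motorola_bits_html
-- ===== SOURCE A (Python) =====
-- def _motorola_bits_html(start_bit: int, length: int) -> set[int]:
--     """DBC Motorola bit traversal: start_bit is the MSB in DBC numbering.
--
--     At each step: if the current bit is the first bit of a byte (b % 8 == 0)
--     jump to the MSB of the *next* byte (+15); otherwise step left (−1).
--     """
--     bits: set[int] = set()
--     b = start_bit
--     for _ in range(length):
--         bits.add(b)
--         if b % 8 == 0:
--             b += 15
--         else:
--             b -= 1
--     return bits
-- ===== SOURCE B (Python) =====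
-- def _motorola_bits_html(start_bit: int, length: int) -> set[int]:
--     """Bytewise Motorola (DBC) bit cover: consume whole runs down to each
--     byte's floor instead of stepping bit by bit."""
--     bits: set[int] = set()
--     b = start_bit
--     remaining = max(length, 0)
--     while remaining > 0:
--         n = min(remaining, b % 8 + 1)      # bits left in this byte, down to its floor
--         bits.update(range(b, b - n, -1))   # whole run in one step, MSB-first
--         remaining -= n
--         b = b - b % 8 + 15                 # MSB of the next byte
--     return bits
-- ===== Notes on version B (the rewrite author's own statement) =====
-- stated objective: alternative
-- what changed: Instead of stepping bit by bit length times, B walks byte runs: each iteration covers the whole contiguous run down to the current byte's floor with one range union and jumps to the next byte's MSB.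
import Mathlib
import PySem

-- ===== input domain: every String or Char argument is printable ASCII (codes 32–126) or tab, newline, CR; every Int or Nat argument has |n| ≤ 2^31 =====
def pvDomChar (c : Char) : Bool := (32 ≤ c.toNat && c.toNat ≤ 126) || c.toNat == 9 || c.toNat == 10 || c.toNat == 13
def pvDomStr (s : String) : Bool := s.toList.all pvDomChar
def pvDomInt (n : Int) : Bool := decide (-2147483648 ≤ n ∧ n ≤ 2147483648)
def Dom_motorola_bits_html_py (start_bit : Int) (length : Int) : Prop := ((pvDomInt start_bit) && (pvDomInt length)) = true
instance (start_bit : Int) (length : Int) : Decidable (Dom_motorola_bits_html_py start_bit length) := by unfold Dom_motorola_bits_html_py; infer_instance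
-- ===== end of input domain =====

-- B replaces A's per-bit loop by a per-byte loop that unions a whole descending run at once.

-- ===== PORT A =====
def motorola_bits_html_py (start_bit : Int) (length : Int) : List Int :=
  ((PySem.List.pyRange 0 length 1).foldl
    (fun (st : PySem.Set Int × Int) _ =>
      let bits := PySem.Set.add st.1 st.2
      if PySem.Int.mod st.2 8 = 0 then (bits, st.2 + 15) else (bits, st.2 - 1))
    (PySem.Set.empty, start_bit)).1

-- ===== PORT B =====
def pvBLoop (bits : PySem.Set Int) (b : Int) (remaining : Int) : PySem.Set Int :=
  if h : remaining ≤ 0 then bits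
  else
    let n := min remaining (PySem.Int.mod b 8 + 1)
    pvBLoop (PySem.Set.update bits (PySem.List.pyRange b (b - n) (-1)))
            (b - PySem.Int.mod b 8 + 15) (remaining - n)
termination_by remaining.toNat
decreasing_by
  have h0 : 0 ≤ PySem.Int.mod b 8 := PySem.Int.mod_nonneg b (by norm_num)
  simp only [not_le] at h
  omega

def motorola_bits_html_py_alt (start_bit : Int) (length : Int) : List Int :=
  pvBLoop PySem.Set.empty start_bit (max length 0)

-- ===== PRECONDITION & SPEC =====
def Spec_motorola_bits_html_py (start_bit : Int) (length : Int) (out : List Int) : Prop := out = motorola_bits_html_py_alt start_bit length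
instance (start_bit : Int) (length : Int) (out : List Int) : Decidable (Spec_motorola_bits_html_py start_bit length out) := by unfold Spec_motorola_bits_html_py; infer_instance

-- ===== CLAIM (what is proved, stated in full; the proofs are below) =====
def Claim_equal_motorola_bits_html_py : Prop := ∀ (start_bit : Int) (length : Int), Dom_motorola_bits_html_py start_bit length → Spec_motorola_bits_html_py start_bit length (motorola_bits_html_py start_bit length)

-- ===== LEMMAS AND PROOFS =====

-- A's loop, indexed by the number of remaining iterations (the range elements are ignored).
def pvAIter : Nat → PySem.Set Int × Int → PySem.Set Int × Int
  | 0, st => st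
  | n+1, st =>
      pvAIter n
        (let bits := PySem.Set.add st.1 st.2
         if PySem.Int.mod st.2 8 = 0 then (bits, st.2 + 15) else (bits, st.2 - 1))

lemma pv_foldl_eq_aiter (l : List Int) : ∀ st : PySem.Set Int × Int,
    l.foldl
      (fun (st : PySem.Set Int × Int) _ =>
        let bits := PySem.Set.add st.1 st.2
        if PySem.Int.mod st.2 8 = 0 then (bits, st.2 + 15) else (bits, st.2 - 1)) st
    = pvAIter l.length st := by
  induction l with
  | nil => intro st; rfl
  | cons x xs ih => intro st; simp only [List.foldl_cons, List.length_cons, pvAIter, ih]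

lemma pv_mod_pred (b : Int) (h : 1 ≤ PySem.Int.mod b 8) :
    PySem.Int.mod (b - 1) 8 = PySem.Int.mod b 8 - 1 := by
  rw [PySem.Int.mod_eq_emod_of_pos (a := b) (by norm_num),
      PySem.Int.mod_eq_emod_of_pos (a := b - 1) (by norm_num)] at *
  omega

-- descending through one byte: k single-bit steps of A are one prefix of B's run
lemma pv_desc (k : Nat) : ∀ (j : Nat) (b : Int) (bits : PySem.Set Int),
    (k : Int) ≤ PySem.Int.mod b 8 →
    pvAIter (k + j) (bits, b)
      = pvAIter j (PySem.Set.update bits (PySem.List.pyRange b (b - k) (-1)), b - k) := by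
  induction k with
  | zero =>
    intro j b bits _
    rw [PySem.List.pyRange_neg_one_eq_nil (by omega)]
    simp [PySem.Set.update]
  | succ k ih =>
    intro j b bits hk
    have hm : 1 ≤ PySem.Int.mod b 8 := by push_cast at hk; omega
    have hne : PySem.Int.mod b 8 ≠ 0 := by omega
    have step : pvAIter (k + 1 + j) (bits, b)
        = pvAIter (k + j) (PySem.Set.add bits b, b - 1) := by
      have : k + 1 + j = (k + j) + 1 := by omega
      rw [this]
      simp only [pvAIter, if_neg hne]
    rw [step, ih j (b - 1) (PySem.Set.add bits b)
          (by rw [pv_mod_pred b hm]; push_cast at hk ⊢; omega)]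
    have hrange : PySem.List.pyRange b (b - (k + 1 : Nat)) (-1)
        = b :: PySem.List.pyRange (b - 1) (b - 1 - (k : Nat)) (-1) := by
      rw [PySem.List.pyRange_neg_one_cons (by push_cast; omega)]
      congr 1
      push_cast; ring_nf
    rw [hrange]
    simp only [PySem.Set.update, List.foldl_cons]
    congr 2
    push_cast; ring
lemma pv_range_snoc (b m : Int) (hm : 0 ≤ m) :
    PySem.List.pyRange b (b - m - 1) (-1)
      = PySem.List.pyRange b (b - m) (-1) ++ [b - m] := by
  rw [PySem.List.pyRange_neg_one, PySem.List.pyRange_neg_one]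
  have h1 : (b - (b - m - 1)).toNat = m.toNat + 1 := by omega
  have h2 : (b - (b - m)).toNat = m.toNat := by omega
  rw [h1, h2, List.range_succ, List.map_append]
  simp only [List.map_cons, List.map_nil]
  congr 2
  omega

lemma pv_main (fuel : Nat) : ∀ (b : Int) (bits : PySem.Set Int),
    (pvAIter fuel (bits, b)).1 = pvBLoop bits b (fuel : Int) := by
  induction fuel using Nat.strong_induction_on with
  | _ fuel ih =>
    intro b bits
    match fuel with
    | 0 => rw [pvBLoop]; rfl
    | f + 1 =>
      have hpos : ¬ ((f + 1 : Nat) : Int) ≤ 0 := by push_cast; omega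
      have hm0 : 0 ≤ PySem.Int.mod b 8 := PySem.Int.mod_nonneg b (by norm_num)
      have hm8 : PySem.Int.mod b 8 < 8 := PySem.Int.mod_lt b (by norm_num)
      rw [pvBLoop, dif_neg hpos]
      by_cases hcase : ((f + 1 : Nat) : Int) ≤ PySem.Int.mod b 8
      · -- run ends inside this byte: n = remaining
        have hn : min ((f + 1 : Nat) : Int) (PySem.Int.mod b 8 + 1) = ((f + 1 : Nat) : Int) := by omega
        simp only [hn]
        have hd := pv_desc (f + 1) 0 b bits hcase
        simp only [Nat.add_zero] at hd
        rw [hd]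
        have hz : ((f + 1 : Nat) : Int) - ((f + 1 : Nat) : Int) = ((0 : Nat) : Int) := by omega
        rw [hz, pvBLoop]
        simp [pvAIter]
      · -- the full byte is consumed: n = mod b 8 + 1, then jump
        set m := PySem.Int.mod b 8 with hmdef
        have hn : min ((f + 1 : Nat) : Int) (m + 1) = m + 1 := by omega
        simp only [hn]
        have hsplit : f + 1 = m.toNat + (f + 1 - m.toNat) := by omega
        rw [hsplit, pv_desc m.toNat (f + 1 - m.toNat) b bits (by omega)]
        have hfloor : PySem.Int.mod (b - m.toNat) 8 = 0 := by
          rw [PySem.Int.mod_eq_emod_of_pos (a := b - (m.toNat : Int)) (by norm_num)]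
          rw [PySem.Int.mod_eq_emod_of_pos (a := b) (by norm_num)] at hmdef
          omega
        have hstep : f + 1 - m.toNat = (f - m.toNat) + 1 := by omega
        rw [hstep]
        simp only [pvAIter, hfloor, if_pos]
        rw [ih (f - m.toNat) (by omega)]
        have hcast : ((f - m.toNat : Nat) : Int) = ((f + 1 : Nat) : Int) - (m + 1) := by
          push_cast; omega
        rw [hcast]
        have hb : b - (m.toNat : Int) + 15 = b - m + 15 := by omega
        rw [hb]
        have hmt : ((m.toNat : Nat) : Int) = m := by omega
        rw [hmt]
        have harg : b - (m + 1) = b - m - 1 := by ring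
        rw [harg, pv_range_snoc b m hm0]
        simp only [PySem.Set.update, List.foldl_append, List.foldl_cons, List.foldl_nil]
        congr 1
        push_cast
        omega

-- ===== VERDICT (by name: the statement is the Claim_ definition above) =====
theorem motorola_bits_html_py_spec : Claim_equal_motorola_bits_html_py := by
  intro start_bit length _
  unfold Spec_motorola_bits_html_py motorola_bits_html_py motorola_bits_html_py_alt
  rw [pv_foldl_eq_aiter, PySem.List.length_pyRange_one]
  have h : max length 0 = ((length - 0).toNat : Int) := by omega
  rw [h, pv_main]
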